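-- pv_equiv track=rewrite | github.com/dlgksqls/python_java_algorithm | 프로그래머스/unrated/181884. n보다 커질 때까지 더하기/n보다 커질 때까지 더하기.py | solution
-- ===== SOURCE A (Python) =====
-- def solution(numbers, n):
--     answer = 0
--     for i in numbers:
--         if answer + i > n:
--             answer += i
--             break
--         else:
--             answer += i
--
--     return answer
-- ===== SOURCE B (Python) =====
-- def solution(numbers, n):
--     # build the full prefix-sum table, then search it
--     sums = []
--     total = 0
--     for x in numbers:
--         total += x
--         sums.append(total)
--     return next((s for s in sums if s > n), sums[-1] if sums else 0)
-- ===== Notes on version B (the rewrite author's own statement) =====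
-- stated objective: alternative
-- what changed: B builds the full prefix-sum table first and then does a separate search for the first sum exceeding n (defaulting to the last sum, or 0 when empty), instead of A's single accumulator loop with an early break.
import Mathlib
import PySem

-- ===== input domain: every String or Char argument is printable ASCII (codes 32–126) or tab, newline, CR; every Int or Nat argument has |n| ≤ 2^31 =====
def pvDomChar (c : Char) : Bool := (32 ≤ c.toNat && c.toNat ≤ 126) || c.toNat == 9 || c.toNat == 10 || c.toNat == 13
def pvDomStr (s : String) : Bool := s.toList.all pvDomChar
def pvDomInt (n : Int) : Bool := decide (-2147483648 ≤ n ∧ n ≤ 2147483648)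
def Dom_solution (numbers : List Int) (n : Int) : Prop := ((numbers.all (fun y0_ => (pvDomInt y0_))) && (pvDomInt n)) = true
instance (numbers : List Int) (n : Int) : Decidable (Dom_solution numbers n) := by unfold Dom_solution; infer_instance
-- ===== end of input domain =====

-- B builds the prefix-sum table first, then searches it; A loops with an early break. Return values agree on all inputs.

-- ===== PORT A =====
-- the for-loop with break, as structural recursion on the list with accumulator `answer`
def solGoA (n : Int) (answer : Int) : List Int → Int
  | [] => answer
  | i :: rest => if answer + i > n then answer + i else solGoA n (answer + i) rest

def solution (numbers : List Int) (n : Int) : Int := solGoA n 0 numbers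

-- ===== PORT B =====
-- the accumulate loop: prefix sums of the list starting from running total t
def prefixSumsB (t : Int) : List Int → List Int
  | [] => []
  | x :: rest => (t + x) :: prefixSumsB (t + x) rest

-- next((s for s in sums if s > n), sums[-1] if sums else 0)
def solution_alt (numbers : List Int) (n : Int) : Int :=
  let sums := prefixSumsB 0 numbers
  match sums.find? (fun s => decide (s > n)) with
  | some s => s
  | none => sums.getLast?.getD 0

-- ===== PRECONDITION & SPEC =====
def Spec_solution (numbers : List Int) (n : Int) (out : Int) : Prop := out = solution_alt numbers n
instance (numbers : List Int) (n : Int) (out : Int) : Decidable (Spec_solution numbers n out) := by unfold Spec_solution; infer_instance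

-- ===== CLAIM (what is proved, stated in full; the proofs are below) =====
def Claim_equal_solution : Prop := ∀ (numbers : List Int) (n : Int), Dom_solution numbers n → Spec_solution numbers n (solution numbers n)

-- ===== LEMMAS AND PROOFS =====
theorem getD_getLast?_cons (y : Int) (ys : List Int) (a b : Int) :
    ((y :: ys).getLast?.getD a) = ((y :: ys).getLast?.getD b) := by
  induction ys generalizing y with
  | nil => simp
  | cons z zs ih => rw [List.getLast?_cons_cons]; exact ih z

theorem solGoA_eq (n : Int) (l : List Int) : ∀ (acc : Int),
    solGoA n acc l =
      (match (prefixSumsB acc l).find? (fun s => decide (s > n)) with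
       | some s => s
       | none => (prefixSumsB acc l).getLast?.getD acc) := by
  induction l with
  | nil => intro acc; simp [solGoA, prefixSumsB]
  | cons i rest ih =>
    intro acc
    by_cases h : acc + i > n
    · simp [solGoA, prefixSumsB, h]
    · simp only [solGoA, prefixSumsB, List.find?, h]
      rw [ih (acc + i)]
      cases hf : (prefixSumsB (acc + i) rest).find? (fun s => decide (s > n)) with
      | some s => simp
      | none =>
        simp only []
        cases hr : prefixSumsB (acc + i) rest with
        | nil => simp [List.getLast?]
        | cons y ys => exact getD_getLast?_cons y ys (acc + i) acc

-- ===== VERDICT (by name: the statement is the Claim_ definition above) =====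
theorem solution_spec : Claim_equal_solution := by
  intro numbers n _
  unfold Spec_solution solution solution_alt
  simpa using solGoA_eq n numbers 0
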